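-- pv_equiv track=rewrite | github.com/finckenstein/KitchenToolsKB | scrape_tasty_web/scrape_tasty_site/spiders/recipes.py | format_ingredients
-- ===== SOURCE A (Python) =====
-- def format_ingredients(ingredients_list):
--     ing_string = ""
--     temp_list = []
--     i = 0
--
--     for cur_elem in ingredients_list:
--         if cur_elem[len(cur_elem) - 1] != ' ' and cur_elem[0] != ' ':
--             prev_elem = ingredients_list[i - 1]
--
--             if i == len(ingredients_list) - 1:
--                 next_elem = ingredients_list[0]
--             else:
--                 next_elem = ingredients_list[i + 1]
--
--             if prev_elem[len(prev_elem) - 1] != ' ' or (next_elem[0] != ' ' and next_elem[0] != ')'):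
--                 ing_string += cur_elem
--                 temp_list.append(ing_string)
--                 ing_string = ""
--                 i += 1
--                 continue
--         ing_string += cur_elem
--         i += 1
--
--     i = 0
--     ing_list = []
--     for cur_elem in temp_list:
--         if cur_elem[0] == ',' and i != 0:
--             prev_elem = temp_list[i - 1]
--             entire_ingredient = str(prev_elem) + str(cur_elem)
--             ing_list.pop()
--             ing_list.append(entire_ingredient)
--             i += 1
--             continue
--         ing_list.append(cur_elem)
--         i += 1
--
--     return ing_list
-- ===== SOURCE B (Python) =====
-- def format_ingredients(ingredients_list):
--     n = len(ingredients_list)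
--     out = []
--     acc = ""
--     prev_raw = ""  # last flushed raw token (before any comma-merge)
--     for i in range(n):
--         cur = ingredients_list[i]
--         flush = False
--         if cur[-1] != ' ' and cur[0] != ' ':
--             prev = ingredients_list[i - 1]
--             nxt = ingredients_list[(i + 1) % n]
--             if prev[-1] != ' ' or (nxt[0] != ' ' and nxt[0] != ')'):
--                 flush = True
--         acc += cur
--         if flush:
--             tok = acc
--             acc = ""
--             if tok[0] == ',' and out:
--                 out[-1] = prev_raw + tok
--             else:
--                 out.append(tok)
--             prev_raw = tok
--     return out
-- ===== Notes on version B (the rewrite author's own statement) =====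
-- stated objective: simpler
-- what changed: B fuses A's two passes (build temp_list, then a second indexed merge pass reading temp_list[i-1]) into a single indexed pass that appends or comma-merges each token at flush time, tracking the raw previous token in a variable instead of re-indexing the intermediate list, and using (i+1)%n instead of the end-of-list branch.
import Mathlib
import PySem

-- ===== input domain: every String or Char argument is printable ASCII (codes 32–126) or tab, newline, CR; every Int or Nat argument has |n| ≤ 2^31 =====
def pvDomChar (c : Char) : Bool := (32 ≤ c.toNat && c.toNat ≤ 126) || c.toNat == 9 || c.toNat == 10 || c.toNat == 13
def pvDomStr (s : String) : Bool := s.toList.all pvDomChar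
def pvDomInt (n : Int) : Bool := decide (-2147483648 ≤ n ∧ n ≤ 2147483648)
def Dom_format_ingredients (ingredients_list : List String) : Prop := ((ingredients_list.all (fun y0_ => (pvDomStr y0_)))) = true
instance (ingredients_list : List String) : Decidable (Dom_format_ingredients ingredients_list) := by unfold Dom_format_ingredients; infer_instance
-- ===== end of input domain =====

-- B fuses A's two passes into one indexed pass (merging comma tokens at flush time via a raw-previous-token variable); objective: simpler single-pass decomposition, no speed claim.

-- s[i] for the ports; Pre_ guarantees the strings indexed are nonempty, so the default is never the result
def chD (s : String) (i : Int) : Char := (PySem.Str.pyGet? s i).getD ' '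

-- ===== PORT A =====
-- A, loop 1: accumulate ing_string, flush into temp_list
def stepA1 (lst : List String) (st : String × List String × Int) (cur : String) : String × List String × Int :=
  let ing := st.1; let temp := st.2.1; let i := st.2.2
  if chD cur (PySem.Str.len cur - 1) != ' ' && chD cur 0 != ' ' then
    let prev := PySem.List.pyGetD lst (i - 1) ""
    let next := if i == (lst.length : Int) - 1 then PySem.List.pyGetD lst 0 "" else PySem.List.pyGetD lst (i + 1) ""
    if chD prev (PySem.Str.len prev - 1) != ' ' || (chD next 0 != ' ' && chD next 0 != ')') then
      ("", temp ++ [ing ++ cur], i + 1)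
    else (ing ++ cur, temp, i + 1)
  else (ing ++ cur, temp, i + 1)

-- A, loop 2: merge a token starting with ',' into the popped tail using temp_list[i-1]
def stepA2 (temp : List String) (st : Int × List String) (cur : String) : Int × List String :=
  let i := st.1; let out := st.2
  if chD cur 0 == ',' && i != 0 then
    (i + 1, out.dropLast ++ [PySem.List.pyGetD temp (i - 1) "" ++ cur])
  else (i + 1, out ++ [cur])

def format_ingredients (ingredients_list : List String) : List String :=
  let temp := (ingredients_list.foldl (stepA1 ingredients_list) ("", [], 0)).2.1
  (temp.foldl (stepA2 temp) (0, [])).2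

-- ===== PORT B =====
-- B: one pass; state = (acc, out, prev_raw, i); merge at flush time using prev_raw
def stepB (lst : List String) (st : String × List String × String × Int) (cur : String) : String × List String × String × Int :=
  let acc := st.1; let out := st.2.1; let prev_raw := st.2.2.1; let i := st.2.2.2
  let flush :=
    if chD cur (PySem.Str.len cur - 1) != ' ' && chD cur 0 != ' ' then
      let prev := PySem.List.pyGetD lst (i - 1) ""
      let nxt := PySem.List.pyGetD lst (PySem.Int.mod (i + 1) (lst.length : Int)) ""
      chD prev (PySem.Str.len prev - 1) != ' ' || (chD nxt 0 != ' ' && chD nxt 0 != ')')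
    else false
  let tok := acc ++ cur
  if flush then
    if chD tok 0 == ',' && !out.isEmpty then
      ("", out.dropLast ++ [prev_raw ++ tok], tok, i + 1)
    else ("", out ++ [tok], tok, i + 1)
  else (tok, out, prev_raw, i + 1)

def format_ingredients_alt (ingredients_list : List String) : List String :=
  (ingredients_list.foldl (stepB ingredients_list) ("", [], "", 0)).2.1

-- ===== PRECONDITION & SPEC =====
-- Pre_ excludes lists containing an empty string: there the Python A (and B) raises IndexError on cur_elem[...].
def Pre_format_ingredients (ingredients_list : List String) : Prop :=
  ∀ s ∈ ingredients_list, s ≠ ""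
instance (ingredients_list : List String) : Decidable (Pre_format_ingredients ingredients_list) := by unfold Pre_format_ingredients; infer_instance

def pvWitness_format_ingredients : List String := ["1 ", "cup ", "flour", ", sifted"]

def Spec_format_ingredients (ingredients_list : List String) (out : List String) : Prop := out = format_ingredients_alt ingredients_list
instance (ingredients_list : List String) (out : List String) : Decidable (Spec_format_ingredients ingredients_list out) := by unfold Spec_format_ingredients; infer_instance

-- ===== CLAIM (what is proved, stated in full; the proofs are below) =====
def Claim_equal_format_ingredients : Prop := ∀ (ingredients_list : List String), Dom_format_ingredients ingredients_list → Pre_format_ingredients ingredients_list → Spec_format_ingredients ingredients_list (format_ingredients ingredients_list)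

-- ===== LEMMAS AND PROOFS =====

-- merge step: what A's loop 2 does to (out, raw previous token)
def mstep (st : List String × String) (t : String) : List String × String :=
  if chD t 0 == ',' && !st.1.isEmpty then (st.1.dropLast ++ [st.2 ++ t], t) else (st.1 ++ [t], t)

theorem pyGetD_prefix_last (pre rest : List String) (h : pre ≠ []) :
    PySem.List.pyGetD (pre ++ rest) ((pre.length : Int) - 1) "" = pre.getLastD "" := by
  have hl : 0 < pre.length := List.length_pos_iff.mpr h
  have hcast : (pre.length : Int) - 1 = ((pre.length - 1 : Nat) : Int) := by omega
  rw [hcast, PySem.List.pyGetD_natCast]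
  rw [List.getD_eq_getElem?_getD, List.getElem?_append_left (by omega),
    List.getElem?_eq_getElem (by omega), List.getLastD_eq_getLast?,
    List.getLast?_eq_getElem?, List.getElem?_eq_getElem (by omega)]

-- A's loop 2 over the suffix ts equals the mstep fold
theorem loop2_eq_mstep (ts : List String) : ∀ (pre out : List String),
    (out = [] ↔ pre = []) →
    ((ts.foldl (stepA2 (pre ++ ts)) ((pre.length : Int), out)).2
      = (ts.foldl mstep (out, pre.getLastD "")).1) := by
  induction ts with
  | nil => intro pre out h; simp
  | cons t ts ih =>
    intro pre out h
    have hco : (((pre.length : Int)) != 0) = !out.isEmpty := by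
      by_cases hp : pre = []
      · simp [hp, h.mpr hp]
      · have ho : out ≠ [] := fun ho => hp (h.mp ho)
        have h0 : pre.length ≠ 0 := by simpa [List.length_eq_zero_iff] using hp
        have h1 : ((pre.length : Int)) ≠ 0 := by exact_mod_cast h0
        have e1 : ((((pre.length : Int))) != 0) = true := by simpa using h1
        have e2 : (!out.isEmpty) = true := by simpa [List.isEmpty_iff] using ho
        rw [e1, e2]
    have hre : pre ++ t :: ts = (pre ++ [t]) ++ ts := by simp
    simp only [List.foldl_cons]
    by_cases hb : (chD t 0 == ',' && !out.isEmpty) = true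
    · have ho : out ≠ [] := by
        rcases Bool.and_eq_true_iff.mp hb with ⟨-, h2⟩
        simpa [List.isEmpty_iff] using h2
      have hpre : pre ≠ [] := fun hp => ho (h.mpr hp)
      have hA : stepA2 (pre ++ t :: ts) ((pre.length : Int), out) t
          = ((pre.length : Int) + 1, out.dropLast ++ [pre.getLastD "" ++ t]) := by
        simp only [stepA2, hco]
        rw [if_pos hb, pyGetD_prefix_last pre (t :: ts) hpre]
      have hm : mstep (out, pre.getLastD "") t
          = (out.dropLast ++ [pre.getLastD "" ++ t], t) := by
        simp only [mstep]; rw [if_pos hb]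
      rw [hA, hm, hre]
      have := ih (pre ++ [t]) (out.dropLast ++ [pre.getLastD "" ++ t]) (by simp)
      simpa using this
    · have hA : stepA2 (pre ++ t :: ts) ((pre.length : Int), out) t
          = ((pre.length : Int) + 1, out ++ [t]) := by
        simp only [stepA2, hco]; rw [if_neg hb]
      have hm : mstep (out, pre.getLastD "") t = (out ++ [t], t) := by
        simp only [mstep]; rw [if_neg hb]
      rw [hA, hm, hre]
      have := ih (pre ++ [t]) (out ++ [t]) (by simp)
      simpa using this

-- B's fold over the remaining input tracks (acc, mstep-fold of A's temp so far, last temp token, i)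
theorem fused_invariant (rest : List String) (lst : List String) :
    ∀ (pre : List String) (acc : String) (temp : List String),
    pre ++ rest = lst →
    (rest.foldl (stepB lst) (acc, (temp.foldl mstep ([], "")).1, (temp.foldl mstep ([], "")).2, (pre.length : Int)))
      = ((rest.foldl (stepA1 lst) (acc, temp, (pre.length : Int))).1,
         (((rest.foldl (stepA1 lst) (acc, temp, (pre.length : Int))).2.1).foldl mstep ([], "")).1,
         (((rest.foldl (stepA1 lst) (acc, temp, (pre.length : Int))).2.1).foldl mstep ([], "")).2,
         (rest.foldl (stepA1 lst) (acc, temp, (pre.length : Int))).2.2) := by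
  induction rest with
  | nil => intro pre acc temp hpre; simp
  | cons cur rest ih =>
    intro pre acc temp hpre
    have hi : pre.length < lst.length := by rw [← hpre]; simp
    have hn : 0 < lst.length := lt_of_le_of_lt (Nat.zero_le _) hi
    have hnext : (if ((pre.length : Int)) == ((lst.length : Int) - 1) then PySem.List.pyGetD lst 0 ""
          else PySem.List.pyGetD lst ((pre.length : Int) + 1) "")
        = PySem.List.pyGetD lst (PySem.Int.mod ((pre.length : Int) + 1) ((lst.length : Int))) "" := by
      by_cases he : pre.length = lst.length - 1
      · have h1 : ((pre.length : Int)) + 1 = ((lst.length : Int)) := by omega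
        have hc : ((pre.length : Int)) = ((lst.length : Int)) - 1 := by omega
        rw [h1, PySem.Int.mod_eq_emod_of_pos (by exact_mod_cast hn), Int.emod_self]
        simp [hc]
      · have hlt : pre.length + 1 < lst.length := by omega
        have hm : PySem.Int.mod ((pre.length : Int) + 1) ((lst.length : Int)) = (pre.length : Int) + 1 := by
          rw [PySem.Int.mod_eq_emod_of_pos (by exact_mod_cast hn)]
          exact Int.emod_eq_of_lt (by positivity) (by exact_mod_cast hlt)
        have hc : (((pre.length : Int)) == ((lst.length : Int) - 1)) = false := by
          simp only [beq_eq_false_iff_ne, ne_eq]; omega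
        rw [hm]; simp [hc]
    have hpre' : (pre ++ [cur]) ++ rest = lst := by simpa using hpre
    simp only [List.foldl_cons]
    by_cases hC : (chD cur (PySem.Str.len cur - 1) != ' ' && chD cur 0 != ' ') = true
    · by_cases hI : (chD (PySem.List.pyGetD lst ((pre.length : Int) - 1) "")
            (PySem.Str.len (PySem.List.pyGetD lst ((pre.length : Int) - 1) "") - 1) != ' '
          || (chD (if ((pre.length : Int)) == ((lst.length : Int) - 1) then PySem.List.pyGetD lst 0 ""
                else PySem.List.pyGetD lst ((pre.length : Int) + 1) "") 0 != ' '
              && chD (if ((pre.length : Int)) == ((lst.length : Int) - 1) then PySem.List.pyGetD lst 0 ""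
                else PySem.List.pyGetD lst ((pre.length : Int) + 1) "") 0 != ')')) = true
      · have hA : stepA1 lst (acc, temp, (pre.length : Int)) cur
            = ("", temp ++ [acc ++ cur], (pre.length : Int) + 1) := by
          simp only [stepA1]; rw [if_pos hC, if_pos hI]
        have hB : stepB lst (acc, (temp.foldl mstep ([], "")).1, (temp.foldl mstep ([], "")).2, (pre.length : Int)) cur
            = ("", ((temp ++ [acc ++ cur]).foldl mstep ([], "")).1,
               ((temp ++ [acc ++ cur]).foldl mstep ([], "")).2, (pre.length : Int) + 1) := by
          simp only [stepB, ← hnext]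
          rw [if_pos hC, List.foldl_append, List.foldl_cons, List.foldl_nil]
          simp only [mstep, hI, if_true]
          split <;> rfl
        rw [hA, hB]
        have := ih (pre ++ [cur]) "" (temp ++ [acc ++ cur]) hpre'
        simpa using this
      · have hA : stepA1 lst (acc, temp, (pre.length : Int)) cur
            = (acc ++ cur, temp, (pre.length : Int) + 1) := by
          simp only [stepA1]; rw [if_pos hC, if_neg hI]
        have hB : stepB lst (acc, (temp.foldl mstep ([], "")).1, (temp.foldl mstep ([], "")).2, (pre.length : Int)) cur
            = (acc ++ cur, (temp.foldl mstep ([], "")).1, (temp.foldl mstep ([], "")).2, (pre.length : Int) + 1) := by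
          simp only [stepB, ← hnext]
          rw [if_pos hC]
          simp only [hI, if_false, Bool.false_eq_true]
        rw [hA, hB]
        have := ih (pre ++ [cur]) (acc ++ cur) temp hpre'
        simpa using this
    · have hA : stepA1 lst (acc, temp, (pre.length : Int)) cur
          = (acc ++ cur, temp, (pre.length : Int) + 1) := by
        simp only [stepA1]; rw [if_neg hC]
      have hB : stepB lst (acc, (temp.foldl mstep ([], "")).1, (temp.foldl mstep ([], "")).2, (pre.length : Int)) cur
          = (acc ++ cur, (temp.foldl mstep ([], "")).1, (temp.foldl mstep ([], "")).2, (pre.length : Int) + 1) := by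
        simp only [stepB]
        rw [if_neg hC]
        simp
      rw [hA, hB]
      have := ih (pre ++ [cur]) (acc ++ cur) temp hpre'
      simpa using this

-- ===== VERDICT (by name: the statement is the Claim_ definition above) =====
theorem format_ingredients_spec : Claim_equal_format_ingredients := by
  intro lst _ _
  unfold Spec_format_ingredients format_ingredients format_ingredients_alt
  have h1 := fused_invariant lst lst [] "" [] (by simp)
  simp only [List.foldl_nil, List.length_nil, Nat.cast_zero] at h1
  have h2 := loop2_eq_mstep ((lst.foldl (stepA1 lst) ("", [], 0)).2.1) [] []
    (by simp)
  simp only [List.nil_append, List.length_nil, Nat.cast_zero, List.getLastD_nil] at h2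
  rw [h1]
  exact h2
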